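-- pv_equiv track=rewrite | github.com/7kylor/stanford-rna-3d-folding-2 | scripts/detect_self_hits.py | find_exact_matches
-- ===== SOURCE A (Python) =====
-- from typing import Dict, List, Tuple, Optional
--
-- def find_exact_matches(test_sequences: Dict[str, str],
--                        template_db: Dict) -> Dict[str, List[str]]:
--     """Find exact sequence matches between test and training."""
--     exact_matches = {}
--
--     # Build sequence to template ID mapping
--     seq_to_templates = {}
--     for template_id, data in template_db['structures'].items():
--         seq = data['sequence']
--         if seq not in seq_to_templates:
--             seq_to_templates[seq] = []
--         seq_to_templates[seq].append(template_id)
--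
--     for test_id, test_seq in test_sequences.items():
--         if test_seq in seq_to_templates:
--             exact_matches[test_id] = seq_to_templates[test_seq]
--
--     return exact_matches
-- ===== SOURCE B (Python) =====
-- def find_exact_matches(test_sequences, template_db):
--     """Find exact sequence matches between test and training.
--
--     No index at all: for each test sequence, scan the template database once
--     with a comprehension collecting the template ids whose sequence equals it.
--     """
--     structures = template_db['structures']
--     result = {}
--     for test_id, test_seq in test_sequences.items():
--         hits = [tid for tid, data in structures.items()
--                 if data['sequence'] == test_seq]
--         if hits:
--             result[test_id] = hits
--     return result
-- ===== Notes on version B (the rewrite author's own statement) =====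
-- stated objective: simpler
-- what changed: B drops A's sequence-to-templates index entirely: for each test id it filters the template structures directly with one comprehension, keeping the id only when the hit list is nonempty (A builds a grouping dict over the templates first and then looks each test sequence up in it).
import Mathlib
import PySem

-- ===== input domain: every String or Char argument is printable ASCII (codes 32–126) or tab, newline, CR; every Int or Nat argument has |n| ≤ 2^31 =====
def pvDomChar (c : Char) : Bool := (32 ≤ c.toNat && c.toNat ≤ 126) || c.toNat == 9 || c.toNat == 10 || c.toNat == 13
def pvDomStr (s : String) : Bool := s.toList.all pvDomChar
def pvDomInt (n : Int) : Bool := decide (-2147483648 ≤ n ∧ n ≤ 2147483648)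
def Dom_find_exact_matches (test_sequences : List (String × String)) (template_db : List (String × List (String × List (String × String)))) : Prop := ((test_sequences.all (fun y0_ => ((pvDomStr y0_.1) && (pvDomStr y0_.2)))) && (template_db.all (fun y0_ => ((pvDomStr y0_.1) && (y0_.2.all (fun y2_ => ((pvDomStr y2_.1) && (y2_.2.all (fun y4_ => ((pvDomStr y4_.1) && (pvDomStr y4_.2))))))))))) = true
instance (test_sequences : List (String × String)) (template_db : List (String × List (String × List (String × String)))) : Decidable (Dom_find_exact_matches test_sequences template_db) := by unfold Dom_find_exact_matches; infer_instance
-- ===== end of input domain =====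

-- B drops A's sequence→templates index: each test sequence filters the template
-- structures directly (one comprehension per test id); simpler, no speed claim.

-- ===== PORT A =====
-- dicts are modelled as PySem.Dict built with ofList from the association lists
def find_exact_matches (test_sequences : List (String × String)) (template_db : List (String × List (String × List (String × String)))) : List (String × List String) :=
  -- seq_to_templates: for template_id, data in template_db['structures'].items(): append
  let seq_to_templates :=
    (PySem.Dict.ofList ((PySem.Dict.ofList template_db).getD "structures" [])).items.foldl
      (fun acc p =>
        let seq := (PySem.Dict.ofList p.2).getD "sequence" ""
        PySem.Dict.insert acc seq (PySem.Dict.getD acc seq [] ++ [p.1]))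
      PySem.Dict.empty
  -- for test_id, test_seq in test_sequences.items(): if test_seq in seq_to_templates: …
  ((PySem.Dict.ofList test_sequences).items.foldl
      (fun em q =>
        if PySem.Dict.contains seq_to_templates q.2 then
          PySem.Dict.insert em q.1 (PySem.Dict.getD seq_to_templates q.2 [])
        else em)
      PySem.Dict.empty).items

-- ===== PORT B =====
def find_exact_matches_alt (test_sequences : List (String × String)) (template_db : List (String × List (String × List (String × String)))) : List (String × List String) :=
  let structures := (PySem.Dict.ofList ((PySem.Dict.ofList template_db).getD "structures" [])).items
  ((PySem.Dict.ofList test_sequences).items.foldl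
      (fun result q =>
        -- hits = [tid for tid, data in structures.items() if data['sequence'] == test_seq]
        let hits := structures.filterMap
          (fun p => if (PySem.Dict.ofList p.2).getD "sequence" "" = q.2 then some p.1 else none)
        if hits ≠ [] then PySem.Dict.insert result q.1 hits else result)
      PySem.Dict.empty).items

-- ===== PRECONDITION & SPEC =====
-- Pre_ excludes exactly the inputs on which the Python A raises KeyError:
-- template_db without a 'structures' key, or some structure entry without a 'sequence' key.
def Pre_find_exact_matches (test_sequences : List (String × String)) (template_db : List (String × List (String × List (String × String)))) : Prop :=
  PySem.Dict.contains (PySem.Dict.ofList template_db) "structures" = true ∧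
  ∀ p ∈ (PySem.Dict.ofList ((PySem.Dict.ofList template_db).getD "structures" [])).items,
    PySem.Dict.contains (PySem.Dict.ofList p.2) "sequence" = true
instance (test_sequences : List (String × String)) (template_db : List (String × List (String × List (String × String)))) : Decidable (Pre_find_exact_matches test_sequences template_db) := by unfold Pre_find_exact_matches; infer_instance

def pvWitness_find_exact_matches : (List (String × String)) × (List (String × List (String × List (String × String)))) :=
  ([("t1", "ACGU"), ("t2", "GG")],
   [("structures", [("T1", [("sequence", "ACGU")]), ("T2", [("sequence", "ACGU")])])])

def Spec_find_exact_matches (test_sequences : List (String × String)) (template_db : List (String × List (String × List (String × String)))) (out : List (String × List String)) : Prop := out = find_exact_matches_alt test_sequences template_db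
instance (test_sequences : List (String × String)) (template_db : List (String × List (String × List (String × String)))) (out : List (String × List String)) : Decidable (Spec_find_exact_matches test_sequences template_db out) := by unfold Spec_find_exact_matches; infer_instance

-- ===== CLAIM (what is proved, stated in full; the proofs are below) =====
def Claim_equal_find_exact_matches : Prop := ∀ (test_sequences : List (String × String)) (template_db : List (String × List (String × List (String × String)))), Dom_find_exact_matches test_sequences template_db → Pre_find_exact_matches test_sequences template_db → Spec_find_exact_matches test_sequences template_db (find_exact_matches test_sequences template_db)

-- ===== LEMMAS AND PROOFS =====

-- the ids (in order) whose key maps to s under A's grouping loop / B's filter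
def pvIdsG {α : Type} (key val : α → String) (ps : List α) (s : String) : List String :=
  ps.filterMap (fun p => if key p = s then some (val p) else none)

-- characterisation of A's 'setdefault-append' grouping fold at one key
theorem pvGrp_get? {α : Type} (key val : α → String) (ps : List α) :
    ∀ (acc : PySem.Dict String (List String)) (s : String),
      PySem.Dict.get?
        (ps.foldl (fun acc p =>
          PySem.Dict.insert acc (key p) (PySem.Dict.getD acc (key p) [] ++ [val p])) acc) s
      = if pvIdsG key val ps s = [] then PySem.Dict.get? acc s
        else some (PySem.Dict.getD acc s [] ++ pvIdsG key val ps s) := by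
  induction ps with
  | nil => intro acc s; simp [pvIdsG]
  | cons p ps ih =>
    intro acc s
    rw [List.foldl_cons, ih]
    by_cases h : key p = s
    · subst h
      rw [PySem.Dict.get?_insert_self, PySem.Dict.getD_insert_self]
      have hcons : pvIdsG key val (p :: ps) (key p) = val p :: pvIdsG key val ps (key p) := by
        simp [pvIdsG]
      rw [hcons]
      by_cases he : pvIdsG key val ps (key p) = []
      · simp [he]
      · simp [he, List.append_assoc]
    · have hne : s ≠ key p := fun hs => h hs.symm
      rw [PySem.Dict.get?_insert_of_ne _ _ hne, PySem.Dict.getD_insert_of_ne _ _ _ hne]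
      have hcons : pvIdsG key val (p :: ps) s = pvIdsG key val ps s := by
        simp [pvIdsG, h]
      rw [hcons]

-- ===== VERDICT (by name: the statement is the Claim_ definition above) =====
theorem find_exact_matches_spec : Claim_equal_find_exact_matches := by
  intro ts tdb _hdom _hpre
  unfold Spec_find_exact_matches
  simp only [find_exact_matches, find_exact_matches_alt]
  refine congrArg PySem.Dict.items ?_
  set stt := (PySem.Dict.ofList ((PySem.Dict.ofList tdb).getD "structures" [])).items with hstt
  set key : String × List (String × String) → String :=
    fun p => (PySem.Dict.ofList p.2).getD "sequence" "" with hkey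
  have hS : ∀ s, PySem.Dict.get?
      (stt.foldl (fun acc p =>
        PySem.Dict.insert acc (key p) (PySem.Dict.getD acc (key p) [] ++ [p.1]))
        PySem.Dict.empty) s
      = if pvIdsG key Prod.fst stt s = [] then none else some (pvIdsG key Prod.fst stt s) := by
    intro s
    rw [pvGrp_get? key Prod.fst stt PySem.Dict.empty s]
    by_cases he : pvIdsG key Prod.fst stt s = [] <;> simp [he]
  have main : ∀ (l : List (String × String)) (em : PySem.Dict String (List String)),
      l.foldl (fun em q =>
        if PySem.Dict.contains
            (stt.foldl (fun acc p =>
              PySem.Dict.insert acc (key p) (PySem.Dict.getD acc (key p) [] ++ [p.1]))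
              PySem.Dict.empty) q.2 then
          PySem.Dict.insert em q.1 (PySem.Dict.getD
            (stt.foldl (fun acc p =>
              PySem.Dict.insert acc (key p) (PySem.Dict.getD acc (key p) [] ++ [p.1]))
              PySem.Dict.empty) q.2 [])
        else em) em
      = l.foldl (fun result q =>
          let hits := stt.filterMap
            (fun p => if key p = q.2 then some p.1 else none)
          if hits ≠ [] then PySem.Dict.insert result q.1 hits else result) em := by
    intro l
    induction l with
    | nil => intro em; rfl
    | cons q l ih =>
      intro em
      simp only [List.foldl_cons]
      have hhits : stt.filterMap
          (fun p => if key p = q.2 then some p.1 else none) = pvIdsG key Prod.fst stt q.2 := rfl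
      by_cases he : pvIdsG key Prod.fst stt q.2 = []
      · have hc : PySem.Dict.contains
            (stt.foldl (fun acc p =>
              PySem.Dict.insert acc (key p) (PySem.Dict.getD acc (key p) [] ++ [p.1]))
              PySem.Dict.empty) q.2 = false := by
          rw [PySem.Dict.contains_eq_isSome_get?, hS q.2, if_pos he]; rfl
        simp only [hc, hhits, he, ne_eq, not_true_eq_false, if_false, Bool.false_eq_true]
        exact ih em
      · have hg : PySem.Dict.get?
            (stt.foldl (fun acc p =>
              PySem.Dict.insert acc (key p) (PySem.Dict.getD acc (key p) [] ++ [p.1]))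
              PySem.Dict.empty) q.2 = some (pvIdsG key Prod.fst stt q.2) := by
          rw [hS q.2, if_neg he]
        have hc : PySem.Dict.contains
            (stt.foldl (fun acc p =>
              PySem.Dict.insert acc (key p) (PySem.Dict.getD acc (key p) [] ++ [p.1]))
              PySem.Dict.empty) q.2 = true := by
          rw [PySem.Dict.contains_eq_isSome_get?, hg]; rfl
        have hgD : PySem.Dict.getD
            (stt.foldl (fun acc p =>
              PySem.Dict.insert acc (key p) (PySem.Dict.getD acc (key p) [] ++ [p.1]))
              PySem.Dict.empty) q.2 [] = pvIdsG key Prod.fst stt q.2 := by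
          rw [PySem.Dict.getD_eq_get?_getD, hg]; rfl
        simp only [hc, hhits, he, ne_eq, not_false_eq_true, hgD, if_pos]
        exact ih _
  exact main _ _
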